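-- pv_equiv track=rewrite | github.com/i-cohen/Isaac | cs591/sg.py | lasker
-- ===== SOURCE A (Python) =====
-- def nimAdd(x,y):
--    return (x ^ y)
--
-- def mex (followers) :
--     y=0
--     while True:
--         if y in followers:
--             y+=1
--         else:
--             return y
--
-- def lasker(upperBound =10):
--     sgValues = {}
--     sgValues[0] = 0
--     for x in range(1,upperBound+1):
--         # if x % 4 is 1 or x % 4 is 2:
--         #     sgValues[x] = x
--         # if x % 4 is 3:
--         #     sgValues[x]= x+1
--         # if x % 4 is 0:
--         #     sgValues[x] = x-1
--         followers = []
--         for y in range(0,x):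
--             followers.append(sgValues[y])
--         if x>1:
--             y = x//2
--             z = x-y
--             followers.append(nimAdd(z,y))
--         sgValues[x] = mex(followers)
--     return sgValues
-- ===== SOURCE B (Python) =====
-- def lasker(upperBound=10):
--     # Closed form of the recurrence: every value equals its own index except that
--     # each number one below a power of two (from three on) swaps values with that power of two.
--     sgValues = {0: 0}
--     for x in range(1, upperBound + 1):
--         if x >= 3 and x & (x + 1) == 0:      # x is one below a power of two
--             sgValues[x] = x + 1
--         elif x >= 4 and x & (x - 1) == 0:    # x is a power of two
--             sgValues[x] = x - 1
--         else:
--             sgValues[x] = x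
--     return sgValues
-- ===== Notes on version B (the rewrite author's own statement) =====
-- stated objective: faster
-- what changed: B replaces A's per-step follower list (rebuilt by scanning all previous entries) and linear mex search with the recurrence's closed form: each index is its own value except that every number one below a power of two (starting at three) swaps values with that power of two.
import Mathlib
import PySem

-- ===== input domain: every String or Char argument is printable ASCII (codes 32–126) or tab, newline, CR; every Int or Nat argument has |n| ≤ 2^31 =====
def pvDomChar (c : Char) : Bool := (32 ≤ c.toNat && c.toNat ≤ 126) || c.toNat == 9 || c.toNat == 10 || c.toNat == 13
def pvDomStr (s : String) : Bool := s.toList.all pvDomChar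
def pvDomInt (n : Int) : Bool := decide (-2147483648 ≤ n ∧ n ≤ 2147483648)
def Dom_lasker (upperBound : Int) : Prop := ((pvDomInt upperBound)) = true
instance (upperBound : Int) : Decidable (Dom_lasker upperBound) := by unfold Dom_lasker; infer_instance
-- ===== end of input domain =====

-- B replaces A's quadratic follower-list + mex scan by the recurrence's closed form (measured faster, asymptotic).

-- ===== PORT A =====
def nimAdd (x y : Int) : Int := PySem.Int.bxor x y

-- Python's `while True: if y in followers: y += 1 else: return y`; the visited y's are
-- distinct members of `followers`, so the loop exits after at most `followers.length`
-- steps and fuel `followers.length + 1` reproduces it exactly.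
def mexAux (followers : List Int) (y : Int) : Nat → Int
  | 0 => y
  | Nat.succ f => if followers.contains y then mexAux followers (y + 1) f else y

def mex (followers : List Int) : Int := mexAux followers 0 (followers.length + 1)

-- loop body of A's `for x in range(1, upperBound+1)`
-- (sgValues[y] is written as getD with default 0: every y in range(0, x) is already a key,
-- so the default is never read and Python's d[y] never raises here)
def laskerStep (sg : PySem.Dict Int Int) (x : Int) : PySem.Dict Int Int :=
  let followers := (PySem.List.pyRange 0 x 1).foldl (fun fs y => fs ++ [sg.getD y 0]) []
  let followers := if 1 < x then
      let y := PySem.Int.floordiv x 2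
      let z := x - y
      followers ++ [nimAdd z y]
    else followers
  sg.insert x (mex followers)

def lasker (upperBound : Int) : List (Int × Int) :=
  ((PySem.List.pyRange 1 (upperBound + 1) 1).foldl laskerStep
    ((PySem.Dict.empty : PySem.Dict Int Int).insert 0 0)).items

-- ===== PORT B =====
def fClosed (x : Int) : Int :=
  if 3 ≤ x ∧ PySem.Int.band x (x + 1) = 0 then x + 1
  else if 4 ≤ x ∧ PySem.Int.band x (x - 1) = 0 then x - 1
  else x

def lasker_alt (upperBound : Int) : List (Int × Int) :=
  ((PySem.List.pyRange 1 (upperBound + 1) 1).foldl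
    (fun sg x => sg.insert x (fClosed x))
    ((PySem.Dict.empty : PySem.Dict Int Int).insert 0 0)).items

-- ===== PRECONDITION & SPEC =====
def Spec_lasker (upperBound : Int) (out : List (Int × Int)) : Prop := out = lasker_alt upperBound
instance (upperBound : Int) (out : List (Int × Int)) : Decidable (Spec_lasker upperBound out) := by unfold Spec_lasker; infer_instance

-- ===== CLAIM (what is proved, stated in full; the proofs are below) =====
def Claim_equal_lasker : Prop := ∀ (upperBound : Int), Dom_lasker upperBound → Spec_lasker upperBound (lasker upperBound)

-- ===== LEMMAS AND PROOFS =====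

-- Nat-level closed form
def Fn (k : Nat) : Nat :=
  if 3 ≤ k ∧ k &&& (k + 1) = 0 then k + 1
  else if 4 ≤ k ∧ k &&& (k - 1) = 0 then k - 1
  else k

theorem fClosed_natCast (k : Nat) : fClosed (k : Int) = ((Fn k : Nat) : Int) := by
  unfold fClosed Fn
  have hc1 : (3 ≤ (k : Int) ∧ PySem.Int.band (k : Int) ((k : Int) + 1) = 0) ↔
      (3 ≤ k ∧ k &&& (k + 1) = 0) := by
    have h1 : ((k : Int) + 1) = ((k + 1 : Nat) : Int) := by push_cast; ring
    rw [h1, PySem.Int.band_natCast]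
    constructor
    · rintro ⟨ha, hb⟩; exact ⟨by exact_mod_cast ha, by exact_mod_cast hb⟩
    · rintro ⟨ha, hb⟩; exact ⟨by exact_mod_cast ha, by exact_mod_cast hb⟩
  have hc2 : (4 ≤ (k : Int) ∧ PySem.Int.band (k : Int) ((k : Int) - 1) = 0) ↔
      (4 ≤ k ∧ k &&& (k - 1) = 0) := by
    constructor
    · rintro ⟨ha, hb⟩
      have hk4 : 4 ≤ k := by exact_mod_cast ha
      have h1 : ((k : Int) - 1) = ((k - 1 : Nat) : Int) := by omega
      rw [h1, PySem.Int.band_natCast] at hb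
      exact ⟨hk4, by exact_mod_cast hb⟩
    · rintro ⟨ha, hb⟩
      have h1 : ((k : Int) - 1) = ((k - 1 : Nat) : Int) := by omega
      rw [h1, PySem.Int.band_natCast]
      exact ⟨by exact_mod_cast ha, by exact_mod_cast hb⟩
  simp only [hc1, hc2]
  split_ifs with ha hb
  · push_cast; ring
  · omega
  · rfl

-- bit recursion lemmas
theorem land_even_succ (q : Nat) : (2*q) &&& (2*q+1) = 2*q := by
  have h := Nat.land_bit false q true q
  simp [Nat.bit] at h
  omega

theorem land_odd_succ (q : Nat) : (2*q+1) &&& (2*q+2) = 2*(q &&& (q+1)) := by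
  have h := Nat.land_bit true q false (q+1)
  simp [Nat.bit] at h
  omega

theorem xor_odd_succ (q : Nat) : (2*q+1) ^^^ (2*q+2) = 2*(q ^^^ (q+1)) + 1 := by
  have h := Nat.xor_bit true q false (q+1)
  simp [Nat.bit] at h
  omega

theorem xor_even_succ (q : Nat) : (2*q) ^^^ (2*q+1) = 1 := by
  have h := Nat.xor_bit false q true q
  simp [Nat.bit] at h
  omega

-- m ^^^ (m+1) is 2m+1 exactly when m and m+1 have disjoint bits
theorem xorsum (m : Nat) :
    (m &&& (m+1) = 0 → m ^^^ (m+1) = 2*m+1) ∧ (m &&& (m+1) ≠ 0 → m ^^^ (m+1) ≠ 2*m+1) := by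
  induction m using Nat.strong_induction_on with
  | _ m ih =>
    by_cases hev : m % 2 = 0
    · obtain ⟨q, rfl⟩ : ∃ q, m = 2*q := ⟨m/2, by omega⟩
      have hl := land_even_succ q
      have hx := xor_even_succ q
      exact ⟨fun h0 => by omega, fun h0 => by omega⟩
    · obtain ⟨q, rfl⟩ : ∃ q, m = 2*q+1 := ⟨m/2, by omega⟩
      simp only [show 2*q+1+1 = 2*q+2 from by omega]
      have hl := land_odd_succ q
      have hx := xor_odd_succ q
      have ihq := ih q (by omega)
      constructor
      · intro h0
        have := ihq.1 (by omega)
        omega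
      · intro h0
        have := ihq.2 (by omega)
        omega

theorem P_odd (x : Nat) (h : x &&& (x+1) = 0) (h3 : 3 ≤ x) : x % 2 = 1 := by
  by_cases hev : x % 2 = 0
  · obtain ⟨q, rfl⟩ : ∃ q, x = 2*q := ⟨x/2, by omega⟩
    have := land_even_succ q
    omega
  · omega

theorem P2_even (x : Nat) (h : x &&& (x-1) = 0) (h4 : 4 ≤ x) : x % 2 = 0 := by
  by_cases hev : x % 2 = 1
  · obtain ⟨q, rfl⟩ : ∃ q, x = 2*q+1 := ⟨x/2, by omega⟩
    rw [show 2*q+1-1 = 2*q from by omega, Nat.land_comm] at h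
    have := land_even_succ q
    omega
  · omega

theorem P_half (m : Nat) : (2*m+1) &&& (2*m+2) = 0 ↔ m &&& (m+1) = 0 := by
  have := land_odd_succ m
  omega

theorem P_chain : ∀ x i : Nat, i &&& (i+1) = 0 → x &&& (x+1) = 0 → i < x → 2*i+1 ≤ x := by
  intro x
  induction x using Nat.strong_induction_on with
  | _ x ih =>
    intro i hi hx hlt
    by_cases hev : x % 2 = 0
    · obtain ⟨q, rfl⟩ : ∃ q, x = 2*q := ⟨x/2, by omega⟩
      have := land_even_succ q
      omega
    · obtain ⟨q, rfl⟩ : ∃ q, x = 2*q+1 := ⟨x/2, by omega⟩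
      rw [show 2*q+1+1 = 2*q+2 from by omega] at hx
      have hq' : q &&& (q+1) = 0 := (P_half q).mp hx
      by_cases hiev : i % 2 = 0
      · obtain ⟨a, rfl⟩ : ∃ a, i = 2*a := ⟨i/2, by omega⟩
        have := land_even_succ a
        omega
      · obtain ⟨a, rfl⟩ : ∃ a, i = 2*a+1 := ⟨i/2, by omega⟩
        rw [show 2*a+1+1 = 2*a+2 from by omega] at hi
        have ha' : a &&& (a+1) = 0 := (P_half a).mp hi
        have := ih q (by omega) a ha' hq' (by omega)
        omega

def P1 (k : Nat) : Prop := 3 ≤ k ∧ k &&& (k + 1) = 0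
def P2 (k : Nat) : Prop := 4 ≤ k ∧ k &&& (k - 1) = 0

theorem Fn_eq_P1 (k : Nat) (h : P1 k) : Fn k = k + 1 := by
  have h' : 3 ≤ k ∧ k &&& (k + 1) = 0 := h
  unfold Fn
  rw [if_pos h']

theorem P1_not_P2 (k : Nat) (h1 : P1 k) (h2 : P2 k) : False := by
  have := P_odd k h1.2 h1.1
  have := P2_even k h2.2 h2.1
  omega

theorem Fn_eq_P2 (k : Nat) (h : P2 k) : Fn k = k - 1 := by
  have h' : 4 ≤ k ∧ k &&& (k - 1) = 0 := h
  have hn : ¬ (3 ≤ k ∧ k &&& (k + 1) = 0) := fun h1 => P1_not_P2 k h1 h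
  unfold Fn
  rw [if_neg hn, if_pos h']

theorem Fn_eq_id (k : Nat) (h1 : ¬ P1 k) (h2 : ¬ P2 k) : Fn k = k := by
  have h1' : ¬ (3 ≤ k ∧ k &&& (k + 1) = 0) := h1
  have h2' : ¬ (4 ≤ k ∧ k &&& (k - 1) = 0) := h2
  unfold Fn
  rw [if_neg h1', if_neg h2']

theorem Fn_le (k : Nat) : Fn k ≤ k + 1 := by
  unfold Fn; split_ifs <;> omega

theorem P2_of_P1_pred (k : Nat) (h : P1 k) : P2 (k + 1) := by
  obtain ⟨h3, hb⟩ := h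
  refine ⟨by omega, ?_⟩
  rw [show k + 1 - 1 = k from rfl, Nat.land_comm]
  exact hb

theorem P1_of_P2 (x : Nat) (h : P2 x) : P1 (x - 1) := by
  obtain ⟨h4, hb⟩ := h
  refine ⟨by omega, ?_⟩
  rw [show x - 1 + 1 = x from by omega, Nat.land_comm]
  exact hb

theorem Fn_invol (k : Nat) : Fn (Fn k) = k := by
  by_cases h1 : P1 k
  · rw [Fn_eq_P1 k h1, Fn_eq_P2 (k + 1) (P2_of_P1_pred k h1)]
    omega
  · by_cases h2 : P2 k
    · rw [Fn_eq_P2 k h2, Fn_eq_P1 (k - 1) (P1_of_P2 k h2)]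
      have := h2.1
      omega
    · rw [Fn_eq_id k h1 h2, Fn_eq_id k h1 h2]

theorem Fn_lt_of_P1x (x i : Nat) (hx : P1 x) (hi : i < x) : Fn i < x := by
  by_cases h1 : P1 i
  · rw [Fn_eq_P1 i h1]
    have := P_chain x i h1.2 hx.2 hi
    have := h1.1
    omega
  · have := Fn_le i
    by_cases h2 : P2 i
    · rw [Fn_eq_P2 i h2]; omega
    · rw [Fn_eq_id i h1 h2]; omega

theorem Fn_lt_of_not_P2x (x i : Nat) (hx : ¬ P2 x) (hi : i < x) : Fn i < x := by
  by_cases h1 : P1 i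
  · rw [Fn_eq_P1 i h1]
    rcases Nat.lt_or_ge (i + 1) x with h | h
    · omega
    · exfalso
      have hix : i + 1 = x := by omega
      exact hx (hix ▸ P2_of_P1_pred i h1)
  · have := Fn_le i
    by_cases h2 : P2 i
    · rw [Fn_eq_P2 i h2]; omega
    · rw [Fn_eq_id i h1 h2]; omega

theorem Fn_lt_of_lt_pred (x i : Nat) (hi : i + 1 < x) : Fn i < x := by
  have := Fn_le i; omega

-- targets not hit by the prefix image
theorem notin_P1 (x k : Nat) (hk : k < x) : Fn k ≠ x + 1 := by
  have := Fn_le k; omega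

theorem notin_P2 (x k : Nat) (hx : P2 x) (hk : k < x) : Fn k ≠ x - 1 := by
  by_cases h1 : P1 k
  · rw [Fn_eq_P1 k h1]
    intro he
    have hxe := P2_even x hx.2 hx.1
    have h4 := hx.1
    have h3 := h1.1
    obtain ⟨q, rfl⟩ : ∃ q, k = 2 * q := ⟨k / 2, by omega⟩
    have hb := h1.2
    rw [show 2 * q + 1 = 2 * q + 1 from rfl] at hb
    have := land_even_succ q
    omega
  · by_cases h2 : P2 k
    · rw [Fn_eq_P2 k h2]
      have := h2.1; have := hx.1
      omega
    · rw [Fn_eq_id k h1 h2]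
      intro he
      exact h1 (he ▸ P1_of_P2 x hx)

theorem notin_gen (x k : Nat) (hx : ¬ P2 x) (hk : k < x) : Fn k ≠ x := by
  by_cases h1 : P1 k
  · rw [Fn_eq_P1 k h1]
    intro he
    exact hx (he ▸ P2_of_P1_pred k h1)
  · by_cases h2 : P2 k
    · rw [Fn_eq_P2 k h2]
      have := h2.1; omega
    · rw [Fn_eq_id k h1 h2]; omega

-- the mex loop returns the smallest value ≥ start not in the list
theorem mexAux_spec (L : List Int) (n : Int) : ∀ (fuel : Nat) (y : Int),
    (∀ i : Int, y ≤ i → i < n → i ∈ L) → n ∉ L → y ≤ n →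
    (n - y).toNat < fuel → mexAux L y fuel = n := by
  intro fuel
  induction fuel with
  | zero => intro y _ _ _ hf; omega
  | succ f ihf =>
    intro y hmem hn hy hf
    unfold mexAux
    by_cases hc : y = n
    · have hcf : L.contains y = false := by rw [hc]; simpa using hn
      rw [hcf]
      simpa using hc
    · have hyn : y < n := lt_of_le_of_ne hy hc
      have hct : L.contains y = true := by simpa using hmem y le_rfl hyn
      rw [hct]
      simp only [if_true]
      exact ihf (y + 1) (fun i h1 h2 => hmem i (by omega) h2) hn (by omega) (by omega)

theorem mex_eq (L : List Int) (n : Nat) (hmem : ∀ i : Nat, i < n → ((i : Nat) : Int) ∈ L)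
    (hn : ((n : Nat) : Int) ∉ L) (hlen : n ≤ L.length) : mex L = (n : Int) := by
  unfold mex
  apply mexAux_spec L (n : Int) (L.length + 1) 0
  · intro i h1 h2
    have hi : i = ((i.toNat : Nat) : Int) := by omega
    rw [hi]
    exact hmem i.toNat (by omega)
  · exact hn
  · omega
  · omega

-- the split move's value
def splitInt (x : Nat) : Int :=
  nimAdd ((x : Int) - PySem.Int.floordiv (x : Int) 2) (PySem.Int.floordiv (x : Int) 2)

theorem floordiv_natCast2 (m : Nat) : PySem.Int.floordiv (m : Int) 2 = ((m / 2 : Nat) : Int) := by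
  exact_mod_cast PySem.Int.floordiv_natCast m 2

theorem splitInt_even (q : Nat) : splitInt (2 * q) = 0 := by
  unfold splitInt nimAdd
  rw [floordiv_natCast2]
  rw [show (2 * q) / 2 = q from by omega]
  rw [show ((2 * q : Nat) : Int) - ((q : Nat) : Int) = ((q : Nat) : Int) from by push_cast; ring]
  rw [PySem.Int.bxor_natCast]
  simp

theorem splitInt_odd (m : Nat) : splitInt (2 * m + 1) = ((m ^^^ (m + 1) : Nat) : Int) := by
  unfold splitInt nimAdd
  rw [floordiv_natCast2]
  rw [show (2 * m + 1) / 2 = m from by omega]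
  rw [show ((2 * m + 1 : Nat) : Int) - ((m : Nat) : Int) = ((m + 1 : Nat) : Int) from by push_cast; ring]
  rw [PySem.Int.bxor_natCast, Nat.xor_comm]

-- the mex of step x = N+1's follower values is the closed form at x
theorem mex_step (N : Nat) :
    mex (if (1 : Int) < (N : Int) + 1
        then ((List.range (N + 1)).map fun k : Nat => fClosed (k : Int)) ++ [splitInt (N + 1)]
        else ((List.range (N + 1)).map fun k : Nat => fClosed (k : Int))) =
      fClosed (((N + 1 : Nat)) : Int) := by
  rcases Nat.eq_zero_or_pos N with rfl | hN
  · decide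
  · rw [if_pos (by omega : (1 : Int) < (N : Int) + 1)]
    set x := N + 1 with hxdef
    have hx2 : 2 ≤ x := by omega
    rw [fClosed_natCast x]
    have hmemL : ∀ v : Int,
        v ∈ (((List.range x).map fun k : Nat => fClosed (k : Int)) ++ [splitInt x]) ↔
          (∃ k, k < x ∧ ((Fn k : Nat) : Int) = v) ∨ v = splitInt x := by
      intro v
      simp only [List.mem_append, List.mem_map, List.mem_range, List.mem_singleton,
        fClosed_natCast]
    by_cases hP1 : P1 x
    · -- Fn x = x + 1, split = x
      have hxodd : x % 2 = 1 := P_odd x hP1.2 hP1.1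
      obtain ⟨m, hm⟩ : ∃ m, x = 2 * m + 1 := ⟨x / 2, by omega⟩
      have hland : m &&& (m + 1) = 0 := by
        have hb := hP1.2
        rw [hm, show 2 * m + 1 + 1 = 2 * m + 2 from by omega] at hb
        exact (P_half m).mp hb
      have hsplit : splitInt x = ((x : Nat) : Int) := by
        rw [hm, splitInt_odd, (xorsum m).1 hland]
      rw [Fn_eq_P1 x hP1]
      apply mex_eq
      · intro i hi
        rw [hmemL]
        rcases Nat.lt_or_ge i x with hlt | hge
        · exact Or.inl ⟨Fn i, Fn_lt_of_P1x x i hP1 hlt, by rw [Fn_invol]⟩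
        · have hieq : i = x := by omega
          subst hieq
          exact Or.inr hsplit.symm
      · rw [hmemL]
        rintro (⟨k, hk, he⟩ | he)
        · exact notin_P1 x k hk (by exact_mod_cast he)
        · rw [hsplit] at he
          have : (x + 1 : Nat) = x := by exact_mod_cast he
          omega
      · simp [List.length_append]
    · by_cases hP2 : P2 x
      · -- Fn x = x - 1, split = 0
        have hxe : x % 2 = 0 := P2_even x hP2.2 hP2.1
        have h4 := hP2.1
        obtain ⟨q, hq⟩ : ∃ q, x = 2 * q := ⟨x / 2, by omega⟩
        have hsplit : splitInt x = 0 := by rw [hq, splitInt_even]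
        rw [Fn_eq_P2 x hP2]
        apply mex_eq
        · intro i hi
          rw [hmemL]
          exact Or.inl ⟨Fn i, Fn_lt_of_lt_pred x i (by omega), by rw [Fn_invol]⟩
        · rw [hmemL]
          rintro (⟨k, hk, he⟩ | he)
          · exact notin_P2 x k hP2 hk (by exact_mod_cast he)
          · rw [hsplit] at he
            have : ((x - 1 : Nat) : Int) = 0 := he
            have : (x - 1 : Nat) = 0 := by exact_mod_cast this
            omega
        · simp [List.length_append]
          omega
      · -- Fn x = x, split ≠ x
        have hsplit : splitInt x ≠ ((x : Nat) : Int) := by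
          by_cases hxe : x % 2 = 0
          · obtain ⟨q, hq⟩ : ∃ q, x = 2 * q := ⟨x / 2, by omega⟩
            rw [hq, splitInt_even]
            intro he
            have : (2 * q : Nat) = 0 := by exact_mod_cast he.symm
            omega
          · obtain ⟨m, hm⟩ : ∃ m, x = 2 * m + 1 := ⟨x / 2, by omega⟩
            have hland : m &&& (m + 1) ≠ 0 := by
              intro h0
              apply hP1
              refine ⟨by omega, ?_⟩
              rw [hm, show 2 * m + 1 + 1 = 2 * m + 2 from by omega]
              exact (P_half m).mpr h0
            rw [hm, splitInt_odd]
            intro he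
            have : m ^^^ (m + 1) = 2 * m + 1 := by exact_mod_cast he
            exact (xorsum m).2 hland this
        rw [Fn_eq_id x hP1 hP2]
        apply mex_eq
        · intro i hi
          rw [hmemL]
          exact Or.inl ⟨Fn i, Fn_lt_of_not_P2x x i hP2 hi, by rw [Fn_invol]⟩
        · rw [hmemL]
          rintro (⟨k, hk, he⟩ | he)
          · exact notin_gen x k hP2 hk (by exact_mod_cast he)
          · exact hsplit he.symm
        · simp [List.length_append]

-- the table both programs build
def tbl (N : Nat) : List (Int × Int) :=
  ((0 : Int), (0 : Int)) :: (List.range N).map (fun k : Nat => ((k : Int) + 1, fClosed ((k : Int) + 1)))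

theorem tbl_succ (N : Nat) :
    tbl (N + 1) = tbl N ++ [(((N : Int) + 1), fClosed ((N : Int) + 1))] := by
  simp [tbl, List.range_succ]

theorem nodup_keys_tbl (N : Nat) : ((PySem.Dict.mk (tbl N) : PySem.Dict Int Int)).keys.Nodup := by
  rw [PySem.Dict.keys_mk]
  unfold tbl
  rw [List.map_cons, List.map_map]
  refine List.nodup_cons.mpr ⟨?_, ?_⟩
  · intro hmem
    simp only [List.mem_map, List.mem_range, Function.comp] at hmem
    obtain ⟨k, _, hk⟩ := hmem
    omega
  · show (List.map (fun k : Nat => (k : Int) + 1) (List.range N)).Nodup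
    exact List.Nodup.map (fun a b h => by omega) List.nodup_range

theorem getD_tbl (N y : Nat) (hy : y ≤ N) :
    (PySem.Dict.mk (tbl N) : PySem.Dict Int Int).getD ((y : Nat) : Int) 0 = fClosed (y : Int) := by
  have hmem : (((y : Nat) : Int), fClosed (y : Int)) ∈ tbl N := by
    rcases Nat.eq_zero_or_pos y with rfl | hpos
    · have h0 : fClosed ((0 : Nat) : Int) = 0 := by decide
      rw [h0]
      exact List.mem_cons_self
    · obtain ⟨j, rfl⟩ : ∃ j, y = j + 1 := ⟨y - 1, by omega⟩
      refine List.mem_cons_of_mem _ (List.mem_map.mpr ⟨j, List.mem_range.mpr (by omega), ?_⟩)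
      have hc : ((j : Int) + 1) = (((j + 1 : Nat)) : Int) := by push_cast; ring
      rw [hc]
  exact PySem.Dict.getD_of_mem_items _ hmem (nodup_keys_tbl N) 0

theorem not_contains_tbl (N : Nat) :
    (PySem.Dict.mk (tbl N) : PySem.Dict Int Int).contains ((N : Int) + 1) = false := by
  have hnm : ((N : Int) + 1) ∉ (PySem.Dict.mk (tbl N) : PySem.Dict Int Int).keys := by
    rw [PySem.Dict.keys_mk]
    unfold tbl
    rw [List.map_cons, List.map_map]
    intro hmem
    rcases List.mem_cons.mp hmem with h0 | hmem'
    · omega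
    · simp only [List.mem_map, List.mem_range, Function.comp] at hmem'
      obtain ⟨k, hk, he⟩ := hmem'
      omega
  cases hc : (PySem.Dict.mk (tbl N) : PySem.Dict Int Int).contains ((N : Int) + 1)
  · rfl
  · exact absurd ((PySem.Dict.contains_iff_mem_keys _ _).mp hc) hnm

theorem step_tbl (N : Nat) :
    laskerStep (PySem.Dict.mk (tbl N)) ((N : Int) + 1) = PySem.Dict.mk (tbl (N + 1)) := by
  show (PySem.Dict.mk (tbl N) : PySem.Dict Int Int).insert ((N : Int) + 1)
      (mex (if (1 : Int) < (N : Int) + 1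
        then ((PySem.List.pyRange 0 ((N : Int) + 1) 1).foldl
            (fun fs y => fs ++ [(PySem.Dict.mk (tbl N) : PySem.Dict Int Int).getD y 0]) []) ++
          [nimAdd (((N : Int) + 1) - PySem.Int.floordiv ((N : Int) + 1) 2)
            (PySem.Int.floordiv ((N : Int) + 1) 2)]
        else ((PySem.List.pyRange 0 ((N : Int) + 1) 1).foldl
            (fun fs y => fs ++ [(PySem.Dict.mk (tbl N) : PySem.Dict Int Int).getD y 0]) []))) =
    PySem.Dict.mk (tbl (N + 1))
  have hrange : PySem.List.pyRange 0 ((N : Int) + 1) 1 =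
      (List.range (N + 1)).map (fun k : Nat => (0 : Int) + (k : Int)) := by
    rw [PySem.List.pyRange_one]
    rw [show (((N : Int) + 1) - 0).toNat = N + 1 from by omega]
  rw [hrange]
  rw [PySem.List.foldl_append_singleton_eq_map]
  rw [List.nil_append, List.map_map]
  have hmapeq : (List.range (N + 1)).map
        ((fun y => (PySem.Dict.mk (tbl N) : PySem.Dict Int Int).getD y 0) ∘ fun k : Nat => (0 : Int) + (k : Int)) =
      (List.range (N + 1)).map (fun k : Nat => fClosed (k : Int)) := by
    apply List.map_congr_left
    intro k hk
    have hk' : k ≤ N := by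
      have := List.mem_range.mp hk
      omega
    show (PySem.Dict.mk (tbl N) : PySem.Dict Int Int).getD ((0 : Int) + (k : Int)) 0 = fClosed (k : Int)
    rw [show ((0 : Int) + (k : Int)) = ((k : Nat) : Int) from by ring]
    exact getD_tbl N k hk'
  rw [hmapeq]
  have hsplit : nimAdd (((N : Int) + 1) - PySem.Int.floordiv ((N : Int) + 1) 2)
      (PySem.Int.floordiv ((N : Int) + 1) 2) = splitInt (N + 1) := by
    unfold splitInt
    rw [show (((N + 1 : Nat)) : Int) = (N : Int) + 1 from by push_cast; ring]
  rw [hsplit]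
  apply PySem.Dict.ext
  rw [PySem.Dict.items_insert_of_not_contains _ _ (not_contains_tbl N)]
  show tbl N ++ [((N : Int) + 1, mex _)] = tbl (N + 1)
  rw [tbl_succ]
  congr 1
  have hm := mex_step N
  rw [show (((N + 1 : Nat)) : Int) = (N : Int) + 1 from by push_cast; ring] at hm
  rw [hm]

theorem foldA (N : Nat) :
    (List.range N).foldl (fun (d : PySem.Dict Int Int) (k : Nat) => laskerStep d (1 + (k : Int)))
      (PySem.Dict.mk (tbl 0)) = PySem.Dict.mk (tbl N) := by
  induction N with
  | zero => rfl
  | succ n ihn =>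
    rw [List.range_succ, List.foldl_append, ihn]
    simp only [List.foldl_cons, List.foldl_nil]
    rw [show (1 + (n : Int)) = (n : Int) + 1 from by omega, step_tbl]

theorem foldB (N : Nat) :
    (List.range N).foldl (fun (d : PySem.Dict Int Int) (k : Nat) => d.insert (1 + (k : Int)) (fClosed (1 + (k : Int))))
      (PySem.Dict.mk (tbl 0)) = PySem.Dict.mk (tbl N) := by
  induction N with
  | zero => rfl
  | succ n ihn =>
    rw [List.range_succ, List.foldl_append, ihn]
    simp only [List.foldl_cons, List.foldl_nil]
    rw [show (1 + (n : Int)) = (n : Int) + 1 from by omega]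
    apply PySem.Dict.ext
    rw [PySem.Dict.items_insert_of_not_contains _ _ (not_contains_tbl n)]
    exact (tbl_succ n).symm

-- ===== VERDICT (by name: the statement is the Claim_ definition above) =====
theorem lasker_spec : Claim_equal_lasker := by
  unfold Claim_equal_lasker Spec_lasker
  intro ub _
  unfold lasker lasker_alt
  rw [PySem.List.pyRange_one]
  rw [show ((PySem.Dict.empty : PySem.Dict Int Int).insert 0 0) = PySem.Dict.mk (tbl 0) from rfl]
  rw [List.foldl_map, List.foldl_map]
  rw [foldA ((ub + 1 - 1).toNat), foldB ((ub + 1 - 1).toNat)]
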